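-- pv_equiv track=rewrite | github.com/sykwon/teddy-dream | astrid/AstridEmbed.py | clip_by_limiting_number_of_prefixes
-- ===== SOURCE A (Python) =====
-- def clip_by_limiting_number_of_prefixes(strings, max_count):
--     prfx_set = set()
--     fail_idx = 0
--     for string in strings:
--         for pos in range(1, len(string) + 1):
--             prfx_set.add(string[:pos])
--         n_prfx = len(prfx_set)
--         if n_prfx > max_count:
--             break
--         fail_idx += 1
--     return strings[:fail_idx]
-- ===== SOURCE B (Python) =====
-- def _lcp(s, t):
--     n = 0
--     for a, b in zip(s, t):
--         if a != b:
--             break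
--         n += 1
--     return n
--
--
-- def clip_by_limiting_number_of_prefixes(strings, max_count):
--     # No prefix set at all: the distinct prefixes contributed by s beyond the
--     # ones already seen number exactly len(s) - max(lcp(s, t) for earlier t),
--     # so a running integer total replaces the set of all prefixes.
--     count = 0
--     prev = []
--     for i, s in enumerate(strings):
--         best = 0
--         for t in prev:
--             best = max(best, _lcp(s, t))
--         count += len(s) - best
--         if count > max_count:
--             return strings[:i]
--         prev.append(s)
--     return strings
-- ===== Notes on version B (the rewrite author's own statement) =====
-- stated objective: alternative
-- what changed: B drops the prefix set entirely: it maintains only a running integer count, adding len(s) minus the maximum longest-common-prefix of s with the earlier strings (that difference is exactly the number of new distinct prefixes s contributes), computed by pairwise character scans over the previously kept strings.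
import Mathlib
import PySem

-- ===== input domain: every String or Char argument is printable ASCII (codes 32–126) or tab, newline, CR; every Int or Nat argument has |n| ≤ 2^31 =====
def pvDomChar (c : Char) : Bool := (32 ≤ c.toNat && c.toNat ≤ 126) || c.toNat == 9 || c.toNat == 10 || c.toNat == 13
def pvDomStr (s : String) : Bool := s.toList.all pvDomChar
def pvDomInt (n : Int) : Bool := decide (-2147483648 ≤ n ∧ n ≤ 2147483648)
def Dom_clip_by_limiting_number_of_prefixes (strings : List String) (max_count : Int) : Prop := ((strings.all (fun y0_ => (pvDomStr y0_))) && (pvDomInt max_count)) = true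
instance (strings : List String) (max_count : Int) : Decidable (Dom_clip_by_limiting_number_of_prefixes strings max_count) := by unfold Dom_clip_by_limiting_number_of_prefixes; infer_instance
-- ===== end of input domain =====

-- B keeps no prefix set at all: the distinct prefixes a string s adds beyond the earlier
-- strings number exactly len(s) - max(lcp(s, t) for earlier t), so B maintains only a
-- running integer total via pairwise longest-common-prefix scans (objective: alternative).

-- ===== PORT A =====
-- for string in strings: for pos in range(1, len(string)+1): prfx_set.add(string[:pos]);
-- n_prfx = len(prfx_set); if n_prfx > max_count: break; fail_idx += 1
def pyA_addPrefixes (string : String) (prfx_set : PySem.Set String) : PySem.Set String :=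
  (PySem.List.pyRange 1 (PySem.Str.len string + 1)).foldl
    (fun st pos => st.add (PySem.Str.slice string none (some pos))) prfx_set

def pyA_loop (max_count : Int) : List String → PySem.Set String → Int → Int
  | [], _, fail_idx => fail_idx
  | string :: rest, prfx_set, fail_idx =>
    let prfx_set' := pyA_addPrefixes string prfx_set
    let n_prfx := PySem.Set.len prfx_set'
    if n_prfx > max_count then fail_idx
    else pyA_loop max_count rest prfx_set' (fail_idx + 1)

def clip_by_limiting_number_of_prefixes (strings : List String) (max_count : Int) : List String :=
  PySem.List.slice strings none (some (pyA_loop max_count strings PySem.Set.empty 0))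

-- ===== PORT B =====
-- def _lcp(s, t): n = 0; for a, b in zip(s, t): if a != b: break; n += 1; return n
def pyB_lcp : List Char → List Char → Nat
  | [], _ => 0
  | _ :: _, [] => 0
  | a :: s, b :: t => if a = b then pyB_lcp s t + 1 else 0

-- best = 0; for t in prev: best = max(best, _lcp(s, t))
def pyB_best (s : List Char) (prev : List String) : Nat :=
  prev.foldl (fun b t => max b (pyB_lcp s t.toList)) 0

-- for i, s in enumerate(strings): …; if count > max_count: return strings[:i]; prev.append(s)
def pyB_loop (strings : List String) (max_count : Int) :
    List String → Int → Int → List String → List String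
  | [], _, _, _ => strings
  | s :: rest, i, count, prev =>
    let best := pyB_best s.toList prev
    let count' := count + PySem.Str.len s - (best : Int)
    if count' > max_count then PySem.List.slice strings none (some i)
    else pyB_loop strings max_count rest (i + 1) count' (prev ++ [s])

def clip_by_limiting_number_of_prefixes_alt (strings : List String) (max_count : Int) : List String :=
  pyB_loop strings max_count strings 0 0 []

-- ===== PRECONDITION & SPEC =====
def Spec_clip_by_limiting_number_of_prefixes (strings : List String) (max_count : Int) (out : List String) : Prop := out = clip_by_limiting_number_of_prefixes_alt strings max_count
instance (strings : List String) (max_count : Int) (out : List String) : Decidable (Spec_clip_by_limiting_number_of_prefixes strings max_count out) := by unfold Spec_clip_by_limiting_number_of_prefixes; infer_instance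

-- ===== CLAIM (what is proved, stated in full; the proofs are below) =====
def Claim_equal_clip_by_limiting_number_of_prefixes : Prop := ∀ (strings : List String) (max_count : Int), Dom_clip_by_limiting_number_of_prefixes strings max_count → Spec_clip_by_limiting_number_of_prefixes strings max_count (clip_by_limiting_number_of_prefixes strings max_count)

-- ===== LEMMAS AND PROOFS =====

-- s[:k] as a named helper for the proofs
def pfx (s : String) (k : Int) : String := PySem.Str.slice s none (some k)

lemma toList_pfx (s : String) (k : Int) (h : 0 ≤ k) :
    (pfx s k).toList = s.toList.take k.toNat := by
  simp [pfx, PySem.Str.toList_slice, PySem.Chars.slice_eq_listSlice, PySem.List.slice_to _ h]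

lemma length_pfx (s : String) (k : Int) (h0 : 0 ≤ k) (hk : k ≤ (s.toList.length : Int)) :
    ((pfx s k).toList.length : Int) = k := by
  rw [toList_pfx s k h0, List.length_take]
  push_cast
  omega

-- k ≤ lcp(u, v) exactly when the k-prefixes agree (and fit)
lemma le_lcp_iff (u : List Char) :
    ∀ (v : List Char) (k : Nat),
      k ≤ pyB_lcp u v ↔ (k ≤ u.length ∧ k ≤ v.length ∧ u.take k = v.take k) := by
  induction u with
  | nil =>
    intro v k
    simp only [pyB_lcp, Nat.le_zero, List.length_nil, List.take_nil]
    constructor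
    · rintro rfl; simp
    · rintro ⟨h, -, -⟩; omega
  | cons a u ih =>
    intro v k
    cases v with
    | nil =>
      simp only [pyB_lcp, Nat.le_zero, List.length_nil, List.take_nil]
      constructor
      · rintro rfl; simp
      · rintro ⟨-, h, -⟩; omega
    | cons b v =>
      cases k with
      | zero => simp
      | succ j =>
        simp only [pyB_lcp]
        by_cases hab : a = b
        · subst hab
          rw [if_pos rfl]
          simp only [List.length_cons, List.take_succ_cons, List.cons.injEq,
            Nat.add_le_add_iff_right, true_and]
          exact ih v j
        · rw [if_neg hab]
          constructor
          · intro h; omega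
          · rintro ⟨-, -, heq⟩
            simp only [List.take_succ_cons, List.cons.injEq] at heq
            exact absurd heq.1 hab

lemma lcp_le_left (u v : List Char) : pyB_lcp u v ≤ u.length :=
  ((le_lcp_iff u v (pyB_lcp u v)).mp le_rfl).1

-- foldl max: the accumulator and every element are ≤ the result
lemma foldl_max_le {α : Type} (f : α → Nat) :
    ∀ (l : List α) (b : Nat),
      b ≤ l.foldl (fun a t => max a (f t)) b ∧
      ∀ t ∈ l, f t ≤ l.foldl (fun a t => max a (f t)) b := by
  intro l
  induction l with
  | nil => intro b; simp
  | cons x xs ih =>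
    intro b
    simp only [List.foldl_cons]
    obtain ⟨h1, h2⟩ := ih (max b (f x))
    refine ⟨le_trans (le_max_left _ _) h1, ?_⟩
    intro t ht
    rcases List.mem_cons.mp ht with rfl | ht'
    · exact le_trans (le_max_right _ _) h1
    · exact h2 t ht'

-- foldl max is the accumulator or attained by an element
lemma foldl_max_cases {α : Type} (f : α → Nat) :
    ∀ (l : List α) (b : Nat),
      l.foldl (fun a t => max a (f t)) b = b ∨
      ∃ t ∈ l, l.foldl (fun a t => max a (f t)) b = f t := by
  intro l
  induction l with
  | nil => intro b; simp
  | cons x xs ih =>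
    intro b
    simp only [List.foldl_cons]
    rcases ih (max b (f x)) with h | ⟨t, ht, he⟩
    · rcases max_cases b (f x) with ⟨he, -⟩ | ⟨he, -⟩
      · exact Or.inl (by rw [h, he])
      · exact Or.inr ⟨x, by simp, by rw [h, he]⟩
    · exact Or.inr ⟨t, by simp [ht], he⟩

lemma best_le_len (s : List Char) (prev : List String) : pyB_best s prev ≤ s.length := by
  rcases foldl_max_cases (fun t => pyB_lcp s t.toList) prev 0 with h | ⟨t, -, he⟩
  · rw [pyB_best, h]; exact Nat.zero_le _
  · rw [pyB_best, he]; exact lcp_le_left s t.toList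

-- membership invariant: A's set is exactly the nonempty prefixes of the processed strings
def MemInv (prev : List String) (seen : PySem.Set String) : Prop :=
  ∀ u, u ∈ seen ↔ ∃ t ∈ prev, ∃ k : Nat, 1 ≤ k ∧ k ≤ t.toList.length ∧ u = pfx t (k : Int)

-- under MemInv, a k-prefix of s is in the set iff k ≤ best
lemma pfx_mem_iff (prev : List String) (seen : PySem.Set String) (hM : MemInv prev seen)
    (s : String) (k : Nat) (h1 : 1 ≤ k) (hk : k ≤ s.toList.length) :
    pfx s (k : Int) ∈ seen ↔ k ≤ pyB_best s.toList prev := by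
  constructor
  · intro hmem
    obtain ⟨t, htp, k', hk'1, hk'len, he⟩ := (hM _).mp hmem
    have hlen1 : ((pfx s (k : Int)).toList.length : Int) = (k : Int) :=
      length_pfx s (k : Int) (by positivity) (by exact_mod_cast hk)
    have hlen2 : ((pfx t (k' : Int)).toList.length : Int) = (k' : Int) :=
      length_pfx t (k' : Int) (by positivity) (by exact_mod_cast hk'len)
    have hkk' : k = k' := by
      have := congrArg (fun z => z.toList.length) he
      simp only at this
      omega
    subst hkk'
    have htake : s.toList.take k = t.toList.take k := by
      have := congrArg String.toList he
      rwa [toList_pfx s _ (by positivity), toList_pfx t _ (by positivity),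
        Int.toNat_natCast] at this
    have hlcp : k ≤ pyB_lcp s.toList t.toList :=
      (le_lcp_iff s.toList t.toList k).mpr ⟨hk, hk'len, htake⟩
    exact le_trans hlcp ((foldl_max_le (fun t => pyB_lcp s.toList t.toList) prev 0).2 t htp)
  · intro hbest
    have hb1 : 1 ≤ pyB_best s.toList prev := le_trans h1 hbest
    rcases foldl_max_cases (fun t => pyB_lcp s.toList t.toList) prev 0 with h | ⟨t, htp, he⟩
    · rw [pyB_best] at hb1; omega
    · have hlcp : k ≤ pyB_lcp s.toList t.toList := by
        rw [pyB_best, he] at hbest; exact hbest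
      obtain ⟨-, hkt, htake⟩ := (le_lcp_iff s.toList t.toList k).mp hlcp
      refine (hM _).mpr ⟨t, htp, k, h1, hkt, ?_⟩
      apply String.toList_inj.mp
      rw [toList_pfx s _ (by positivity), toList_pfx t _ (by positivity),
        Int.toNat_natCast]
      exact htake

-- adding elements that are already members leaves the set unchanged
lemma foldl_add_of_mem (g : Int → String) :
    ∀ (l : List Int) (t : PySem.Set String), (∀ x ∈ l, g x ∈ t) →
      l.foldl (fun t x => t.add (g x)) t = t := by
  intro l
  induction l with
  | nil => intro t _; rfl
  | cons x xs ih =>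
    intro t h
    simp only [List.foldl_cons]
    have hx : t.add (g x) = t := by
      have hct : t.contains (g x) = true := by
        simpa [PySem.Set.contains] using h x (by simp)
      simp only [PySem.Set.add, hct]; simp
    rw [hx]
    exact ih t (fun y hy => h y (by simp [hy]))

-- adding pairwise-distinct fresh elements appends them
lemma foldl_add_of_fresh (g : Int → String) :
    ∀ (l : List Int) (t : PySem.Set String), (∀ x ∈ l, g x ∉ t) →
      (l.map g).Nodup →
      l.foldl (fun t x => t.add (g x)) t = t ++ l.map g := by
  intro l
  induction l with
  | nil => intro t _ _; simp
  | cons x xs ih =>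
    intro t hfresh hnd
    simp only [List.foldl_cons, List.map_cons]
    have hct : t.contains (g x) = false := by
      simpa [PySem.Set.contains] using hfresh x (by simp)
    have hx : t.add (g x) = t ++ [g x] := by
      simp only [PySem.Set.add, hct]; simp
    rw [hx, ih (t ++ [g x]) ?_ (List.nodup_cons.mp hnd).2]
    · simp
    · intro y hy hmem
      rcases List.mem_append.mp hmem with h | h
      · exact hfresh y (by simp [hy]) h
      · have : g y = g x := by simpa using h
        exact (List.nodup_cons.mp hnd).1 (this ▸ List.mem_map_of_mem hy)

lemma loop_eq (strings : List String) (max_count : Int) :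
    ∀ (rest prev : List String) (seen : PySem.Set String) (count : Int),
      strings = prev ++ rest →
      MemInv prev seen →
      count = PySem.Set.len seen →
      pyB_loop strings max_count rest ((prev.length : Nat) : Int) count prev
        = PySem.List.slice strings none (some (pyA_loop max_count rest seen ((prev.length : Nat) : Int))) := by
  intro rest
  induction rest with
  | nil =>
    intro prev seen count hsplit hM hcount
    simp only [pyB_loop, pyA_loop]
    rw [PySem.List.slice_to _ (by positivity), Int.toNat_natCast, hsplit]
    simp
  | cons s rest ih =>
    intro prev seen count hsplit hM hcount
    set m := pyB_best s.toList prev with hm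
    set L := s.toList.length with hL
    have hmL : m ≤ L := best_le_len s.toList prev
    have hlen_s : PySem.Str.len s = (L : Int) := by simp [PySem.Str.len, hL]
    -- A's fold over all prefixes = skip the first m (already present), append the rest
    have hsplitA : pyA_addPrefixes s seen
        = (PySem.List.pyRange ((m : Int) + 1) ((L : Int) + 1)).foldl
            (fun t q => t.add (PySem.Str.slice s none (some q))) seen := by
      unfold pyA_addPrefixes
      rw [hlen_s,
        PySem.List.pyRange_one_append 1 ((m : Int) + 1) ((L : Int) + 1)
          (by omega) (by exact_mod_cast by omega),
        List.foldl_append]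
      congr 1
      apply foldl_add_of_mem (fun q => PySem.Str.slice s none (some q))
      intro x hx
      rw [PySem.List.mem_pyRange_one] at hx
      have hx' : x = ((x.toNat : Nat) : Int) := by omega
      show pfx s x ∈ seen
      rw [hx']
      exact (pfx_mem_iff prev seen hM s x.toNat (by omega) (by omega)).mpr (by omega)
    set l := PySem.List.pyRange ((m : Int) + 1) ((L : Int) + 1) with hl
    have hmeml : ∀ x ∈ l, (m : Int) + 1 ≤ x ∧ x ≤ (L : Int) := by
      intro x hx
      rw [hl, PySem.List.mem_pyRange_one] at hx
      omega
    have hfresh : ∀ x ∈ l, pfx s x ∉ seen := by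
      intro x hx hmem'
      obtain ⟨hx1, hx2⟩ := hmeml x hx
      have hx' : x = ((x.toNat : Nat) : Int) := by omega
      rw [hx'] at hmem'
      have := (pfx_mem_iff prev seen hM s x.toNat (by omega) (by omega)).mp hmem'
      omega
    have hnodup : (l.map (fun x => pfx s x)).Nodup := by
      refine List.Nodup.map_on ?_ ?_
      · intro x hx y hy hxy
        obtain ⟨hx1, hx2⟩ := hmeml x hx
        obtain ⟨hy1, hy2⟩ := hmeml y hy
        have e1 : ((pfx s x).toList.length : Int) = x := length_pfx s x (by omega) (by omega)
        have e2 : ((pfx s y).toList.length : Int) = y := length_pfx s y (by omega) (by omega)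
        rw [← e1, ← e2, hxy]
      · exact (PySem.List.pairwise_lt_pyRange_one _ _).imp fun h => ne_of_lt h
    have hfoldl : l.foldl (fun t q => t.add (PySem.Str.slice s none (some q))) seen
        = seen ++ l.map (fun x => pfx s x) :=
      foldl_add_of_fresh (fun q => PySem.Str.slice s none (some q)) l seen hfresh hnodup
    set S' := seen ++ l.map (fun x => pfx s x) with hS'
    have hlenl : (l.length : Int) = (L : Int) - (m : Int) := by
      rw [hl, PySem.List.length_pyRange_one]
      omega
    have hlenS : PySem.Set.len S' = PySem.Set.len seen + (L : Int) - (m : Int) := by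
      simp only [hS', PySem.Set.len, List.length_append, List.length_map]
      push_cast
      omega
    have hMem' : MemInv (prev ++ [s]) S' := by
      intro u
      constructor
      · intro hu
        rcases List.mem_append.mp hu with h | h
        · obtain ⟨t, ht, k, hk1, hk2, he⟩ := (hM u).mp h
          exact ⟨t, by simp [ht], k, hk1, hk2, he⟩
        · obtain ⟨x, hxl, hxe⟩ := List.mem_map.mp h
          obtain ⟨hx1, hx2⟩ := hmeml x hxl
          refine ⟨s, by simp, x.toNat, by omega, by omega, ?_⟩
          rw [← hxe]
          congr 1
          omega
      · rintro ⟨t, ht, k, hk1, hk2, he⟩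
        rcases List.mem_append.mp ht with htp | hts
        · exact List.mem_append.mpr (Or.inl ((hM u).mpr ⟨t, htp, k, hk1, hk2, he⟩))
        · have hts' : t = s := by simpa using hts
          subst hts'
          by_cases hkm : k ≤ m
          · exact List.mem_append.mpr (Or.inl
              (he ▸ (pfx_mem_iff prev seen hM t k hk1 hk2).mpr hkm))
          · refine List.mem_append.mpr (Or.inr (List.mem_map.mpr ⟨(k : Int), ?_, he.symm⟩))
            rw [hl, PySem.List.mem_pyRange_one]
            constructor
            · omega
            · rw [← hL] at hk2; omega
    have hcnt : count + PySem.Str.len s - (m : Int) = PySem.Set.len S' := by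
      rw [hlenS, hcount, hlen_s]
    simp only [pyB_loop, pyA_loop, hsplitA, hfoldl, ← hm, hcnt]
    by_cases hgt : PySem.Set.len S' > max_count
    · rw [if_pos hgt, if_pos hgt]
    · rw [if_neg hgt, if_neg hgt]
      have hcast : ((prev.length : Nat) : Int) + 1 = (((prev ++ [s]).length : Nat) : Int) := by
        simp
      rw [hcast]
      exact ih (prev ++ [s]) S' (PySem.Set.len S')
        (by rw [hsplit]; simp) hMem' rfl

-- ===== VERDICT (by name: the statement is the Claim_ definition above) =====
theorem clip_by_limiting_number_of_prefixes_spec : Claim_equal_clip_by_limiting_number_of_prefixes := by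
  intro strings max_count _
  unfold Spec_clip_by_limiting_number_of_prefixes clip_by_limiting_number_of_prefixes
    clip_by_limiting_number_of_prefixes_alt
  have h := loop_eq strings max_count strings [] PySem.Set.empty 0
    (by simp) (by intro u; simp [PySem.Set.empty]) rfl
  simpa using h.symm
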